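-- pv_equiv track=rewrite | github.com/erlandbo/ncn-cuda | test_groups_v3.py | stage_groups_local_first
-- ===== SOURCE A (Python) =====
-- from typing import List
--
-- def stage_groups_local_first(N: int, block_size: int, stage: int) -> List[List[int]]:
--     """
--     Produce a partition of 1..N into m = N//block_size groups of size block_size for a given stage.
--     - Stage 0: strict local blocks -> [1..block_size], [block_size+1..2*block_size], ...
--     - Stage l>0: stride s = 2**(l-1) across blocks (wraps mod m), mixing blocks progressively.
--     Each group G_b (b=0..m-1) contains for offsets o=0..block_size-1 the index:
--         idx = (block * block_size) + o + 1
--     where block = (b + o * s) % m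
--     Requirements: N % block_size == 0
--     """
--     assert N % block_size == 0, "block_size must divide N"
--     m = N // block_size
--     # stage 0 -> s = 0 yields contiguous blocks; stage 1 -> s = 1, stage 2 -> s = 2, etc.
--     s = 0 if stage == 0 else (1 << (stage - 1)) % m
--
--     groups: List[List[int]] = []
--     for b in range(m):
--         g = []
--         for o in range(block_size):
--             block = (b + o * s) % m
--             idx = block * block_size + o + 1   # convert to 1-based index
--             g.append(idx)
--         groups.append(g)
--     return groups
-- ===== SOURCE B (Python) =====
-- from typing import List
--
-- def stage_groups_local_first(N: int, block_size: int, stage: int) -> List[List[int]]: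
--     # Column-wise construction: for each offset build its rotated column once
--     # (slice rotation), then distribute it across the m rows.
--     assert N % block_size == 0, "block_size must divide N"
--     m = N // block_size
--     if m == 0:
--         return []
--     s = 0 if stage == 0 else (1 << (stage - 1)) % m
--     rows: List[List[int]] = [[] for _ in range(m)]
--     for o in range(block_size):
--         base = [k * block_size + o + 1 for k in range(m)]
--         r = (o * s) % m
--         col = base[r:] + base[:r]
--         for row, v in zip(rows, col):
--             row.append(v)
--     return rows
-- ===== Notes on version B (the rewrite author's own statement) =====
-- stated objective: alternative
-- what changed: B builds, per offset, the whole rotated column once by list slicing (base[r:]+base[:r]) and distributes it across m accumulated rows, instead of A's per-(group,offset) modular block-index computation; Pre_ excludes exactly the inputs where A raises (block_size==0, N%block_size!=0, negative stage, or stage>0 with m==0).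
import Mathlib
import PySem

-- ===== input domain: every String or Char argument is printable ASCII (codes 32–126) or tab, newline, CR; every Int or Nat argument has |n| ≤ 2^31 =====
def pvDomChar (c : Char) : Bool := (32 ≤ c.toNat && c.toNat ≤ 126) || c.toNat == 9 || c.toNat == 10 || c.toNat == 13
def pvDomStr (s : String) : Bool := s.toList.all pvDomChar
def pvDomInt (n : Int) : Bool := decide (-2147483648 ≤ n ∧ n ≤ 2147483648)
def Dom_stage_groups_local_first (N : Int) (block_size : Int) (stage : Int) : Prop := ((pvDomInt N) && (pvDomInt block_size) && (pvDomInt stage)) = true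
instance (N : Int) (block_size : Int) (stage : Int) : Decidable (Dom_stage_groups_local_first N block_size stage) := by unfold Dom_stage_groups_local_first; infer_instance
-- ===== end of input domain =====

-- B builds each offset's rotated column once by slicing and distributes it across the m rows,
-- instead of A's per-(group,offset) modular block-index computation (alternative decomposition, same cost).


-- ===== PORT A =====
-- '1 << (stage-1)' is ported as Nat shiftLeft on (stage-1).toNat; exact for stage ≥ 1,
-- and stage ≤ 0 never reaches it (stage = 0 takes the first branch, stage < 0 is outside Pre_:
-- Python raises ValueError on a negative shift).
def stage_groups_local_first (N : Int) (block_size : Int) (stage : Int) : List (List Int) :=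
  let m := PySem.Int.floordiv N block_size
  let s : Int := if stage = 0 then 0 else PySem.Int.mod ((1 <<< (stage - 1).toNat : Nat) : Int) m
  (PySem.List.pyRange 0 m 1).foldl (fun groups b =>
    groups ++ [(PySem.List.pyRange 0 block_size 1).foldl (fun g o =>
      g ++ [PySem.Int.mod (b + o * s) m * block_size + o + 1]) []]) []

-- ===== PORT B =====
def stage_groups_local_first_alt (N : Int) (block_size : Int) (stage : Int) : List (List Int) :=
  let m := PySem.Int.floordiv N block_size
  if m = 0 then []
  else
    let s : Int := if stage = 0 then 0 else PySem.Int.mod ((1 <<< (stage - 1).toNat : Nat) : Int) m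
    (PySem.List.pyRange 0 block_size 1).foldl (fun rows o =>
      let base := (PySem.List.pyRange 0 m 1).map (fun k => k * block_size + o + 1)
      let r := PySem.Int.mod (o * s) m
      let col := PySem.List.slice base (some r) none ++ PySem.List.slice base none (some r)
      List.zipWith (fun row v => row ++ [v]) rows col)
      ((PySem.List.pyRange 0 m 1).map (fun _ => ([] : List Int)))

-- ===== PRECONDITION & SPEC =====
-- Pre_ is exactly where the Python A returns normally: block_size ≠ 0 (else ZeroDivisionError),
-- block_size ∣ N (else the assert fires), stage ≥ 0 (else ValueError on the shift),
-- and if stage > 0 then m ≠ 0 (else ZeroDivisionError at '% m').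
def Pre_stage_groups_local_first (N : Int) (block_size : Int) (stage : Int) : Prop :=
  block_size ≠ 0 ∧ PySem.Int.mod N block_size = 0 ∧ 0 ≤ stage ∧
    (0 < stage → PySem.Int.floordiv N block_size ≠ 0)
instance (N : Int) (block_size : Int) (stage : Int) : Decidable (Pre_stage_groups_local_first N block_size stage) := by unfold Pre_stage_groups_local_first; infer_instance
def pvWitness_stage_groups_local_first : Int × Int × Int := (8, 2, 1)

def Spec_stage_groups_local_first (N : Int) (block_size : Int) (stage : Int) (out : List (List Int)) : Prop := out = stage_groups_local_first_alt N block_size stage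
instance (N : Int) (block_size : Int) (stage : Int) (out : List (List Int)) : Decidable (Spec_stage_groups_local_first N block_size stage out) := by unfold Spec_stage_groups_local_first; infer_instance

-- ===== CLAIM (what is proved, stated in full; the proofs are below) =====
def Claim_equal_stage_groups_local_first : Prop := ∀ (N : Int) (block_size : Int) (stage : Int), Dom_stage_groups_local_first N block_size stage → Pre_stage_groups_local_first N block_size stage → Spec_stage_groups_local_first N block_size stage (stage_groups_local_first N block_size stage)


-- ===== LEMMAS AND PROOFS =====

-- Rotating the base column by r = x % m realigns position b with block (b + x) % m.
lemma pv_col_rotate (m bs o x : Int) (hm : 0 < m) :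
    PySem.List.slice ((PySem.List.pyRange 0 m).map (fun k => k * bs + o + 1)) (some (PySem.Int.mod x m)) none
      ++ PySem.List.slice ((PySem.List.pyRange 0 m).map (fun k => k * bs + o + 1)) none (some (PySem.Int.mod x m))
    = (PySem.List.pyRange 0 m).map (fun b => PySem.Int.mod (b + x) m * bs + o + 1) := by
  have hr0 : 0 ≤ PySem.Int.mod x m := PySem.Int.mod_nonneg x hm
  have hrm : PySem.Int.mod x m < m := PySem.Int.mod_lt x hm
  set r := PySem.Int.mod x m with hrdef
  set g : Int → Int := fun k => k * bs + o + 1 with hg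
  -- congruence: (b + x) % m = (b + r) % m
  have hcong : ∀ b : Int, PySem.Int.mod (b + x) m = PySem.Int.mod (b + r) m := by
    intro b
    rw [PySem.Int.mod_eq_emod_of_pos hm, PySem.Int.mod_eq_emod_of_pos hm, hrdef,
      PySem.Int.mod_eq_emod_of_pos hm, Int.add_emod b x,
      Int.add_emod b (x % m), Int.emod_emod_of_dvd x (dvd_refl m)]
  have hsplitL : PySem.List.pyRange 0 m = PySem.List.pyRange 0 r ++ PySem.List.pyRange r m :=
    PySem.List.pyRange_one_append 0 r m hr0 (le_of_lt hrm)
  have hsplitR : PySem.List.pyRange 0 m = PySem.List.pyRange 0 (m - r) ++ PySem.List.pyRange (m - r) m :=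
    PySem.List.pyRange_one_append 0 (m - r) m (by omega) (by omega)
  have hlen1 : ((PySem.List.pyRange 0 r).map g).length = r.toNat := by
    simp [PySem.List.length_pyRange_one]
  rw [PySem.List.slice_from _ hr0, PySem.List.slice_to _ hr0]
  conv_lhs => rw [hsplitL, List.map_append, ← hlen1, List.drop_left, List.take_left]
  conv_rhs => rw [hsplitR, List.map_append]
  congr 1
  · -- first RHS segment: b ∈ [0, m-r) gives (b + x) % m = b + r
    have h1 : (PySem.List.pyRange 0 (m - r)).map (fun b => PySem.Int.mod (b + x) m * bs + o + 1)
        = (PySem.List.pyRange 0 (m - r)).map (fun b => g (b + r)) := by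
      apply List.map_congr_left
      intro b hb
      rw [PySem.List.mem_pyRange_one] at hb
      rw [hcong b, PySem.Int.mod_eq_emod_of_pos hm, Int.emod_eq_of_lt (by omega) (by omega)]
    rw [h1, PySem.List.pyRange_one r m, PySem.List.pyRange_one 0 (m - r), List.map_map, List.map_map]
    simp only [Int.sub_zero]
    apply List.map_congr_left
    intro k _
    simp only [Function.comp_apply, hg]
    ring
  · -- second RHS segment: b ∈ [m-r, m) gives (b + x) % m = b + r - m
    have h2 : (PySem.List.pyRange (m - r) m).map (fun b => PySem.Int.mod (b + x) m * bs + o + 1)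
        = (PySem.List.pyRange (m - r) m).map (fun b => g (b + r - m)) := by
      apply List.map_congr_left
      intro b hb
      rw [PySem.List.mem_pyRange_one] at hb
      have hv : (b + r) % m = b + r - m := by
        conv_lhs => rw [show b + r = b + r - m + m * 1 by ring]
        rw [Int.add_mul_emod_self_left]
        exact Int.emod_eq_of_lt (by omega) (by omega)
      rw [hcong b, PySem.Int.mod_eq_emod_of_pos hm, hv]
    rw [h2, PySem.List.pyRange_one 0 r, PySem.List.pyRange_one (m - r) m]
    have hnat : (m - (m - r)).toNat = (r - 0).toNat := by omega
    rw [hnat, List.map_map, List.map_map]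
    apply List.map_congr_left
    intro k _
    simp only [Function.comp, hg]
    ring

-- B's column-distribution fold in closed form (columns given as maps over the same row index list).
lemma pv_bfold (R : List Int) (colf : Int → Int → Int) (os : List Int) (rowf : Int → List Int) :
    os.foldl (fun rows o => List.zipWith (fun row v => row ++ [v]) rows (R.map (colf o))) (R.map rowf)
    = R.map (fun b => rowf b ++ os.map (fun o => colf o b)) := by
  induction os generalizing rowf with
  | nil => simp
  | cons o os ih =>
    simp only [List.foldl_cons, List.zipWith_map, List.zipWith_self]
    rw [ih (fun b => rowf b ++ [colf o b])]
    simp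

-- a zipWith-against-[] fold stays [] (the m ≤ 0 degenerate case of B)
lemma pv_bfold_nil (colv : Int → List Int) (os : List Int) :
    os.foldl (fun rows o => List.zipWith (fun row v => row ++ [v]) rows (colv o)) ([] : List (List Int)) = [] := by
  induction os with
  | nil => rfl
  | cons o os ih => simpa using ih

-- ===== VERDICT (by name: the statement is the Claim_ definition above) =====
theorem stage_groups_local_first_spec : Claim_equal_stage_groups_local_first := by
  intro N block_size stage _ hpre
  obtain ⟨h1, h2, h3, h4⟩ := hpre
  unfold Spec_stage_groups_local_first stage_groups_local_first stage_groups_local_first_alt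
  simp only []
  set m := PySem.Int.floordiv N block_size with hm
  set s : Int := if stage = 0 then 0
    else PySem.Int.mod ((1 <<< (stage - 1).toNat : Nat) : Int) m with hs
  by_cases hm0 : m = 0
  · -- both return []
    rw [if_pos hm0, hm0, PySem.List.pyRange_one_eq_nil (le_refl 0)]
    rfl
  rw [if_neg hm0]
  rcases lt_or_gt_of_ne hm0 with hneg | hpos
  · -- m < 0: both ranges over groups are empty
    rw [PySem.List.pyRange_one_eq_nil (le_of_lt hneg)]
    simp only [List.map_nil, List.foldl_nil]
    exact (pv_bfold_nil _ _).symm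
  · -- m > 0: both equal the map-of-maps closed form
    -- A side
    rw [show (List.foldl (fun groups b => groups ++ [List.foldl
          (fun g o => g ++ [PySem.Int.mod (b + o * s) m * block_size + o + 1]) []
          (PySem.List.pyRange 0 block_size)]) [] (PySem.List.pyRange 0 m))
        = (PySem.List.pyRange 0 m).map (fun b => (PySem.List.pyRange 0 block_size).map
            (fun o => PySem.Int.mod (b + o * s) m * block_size + o + 1)) from by
      simp only [PySem.List.foldl_append_singleton_eq_map, List.nil_append]]
    -- B side: replace each sliced column by its closed form, then evaluate the fold
    rw [PySem.List.foldl_congr_mem (PySem.List.pyRange 0 block_size)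
      (fun rows o =>
        List.zipWith (fun row v => row ++ [v]) rows
          (PySem.List.slice ((PySem.List.pyRange 0 m).map (fun k => k * block_size + o + 1))
              (some (PySem.Int.mod (o * s) m)) none
            ++ PySem.List.slice ((PySem.List.pyRange 0 m).map (fun k => k * block_size + o + 1))
              none (some (PySem.Int.mod (o * s) m))))
      (fun rows o =>
        List.zipWith (fun row v => row ++ [v]) rows
          ((PySem.List.pyRange 0 m).map (fun b => PySem.Int.mod (b + o * s) m * block_size + o + 1)))
      _ (by
        intro rows o _
        exact congrArg (List.zipWith (fun row v => row ++ [v]) rows)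
          (pv_col_rotate m block_size o (o * s) hpos))]
    rw [pv_bfold (PySem.List.pyRange 0 m)
      (fun o b => PySem.Int.mod (b + o * s) m * block_size + o + 1)
      (PySem.List.pyRange 0 block_size) (fun _ => [])]
    simp
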